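-- pv_equiv track=rewrite | github.com/hisyam99/PRAK-PEMROGRAMAN-FUNGSIONAL-2024 | Tugas/MODUL_3/TUGAS/TUGAS_1/tugas1.py | arithmetic_geometric_sequence
-- ===== SOURCE A (Python) =====
-- def arithmetic_geometric_sequence(a, d, r, n):
--     if n == 1:
--         return [a]
--     else:
--         sequence = arithmetic_geometric_sequence(a, d, r, n - 1)
--         next_term = (a + (n - 1) * d) * (r ** (n - 1))
--         sequence.append(next_term)
--         return sequence
-- ===== SOURCE B (Python) =====
-- def arithmetic_geometric_sequence(a, d, r, n):
--     seq = []
--     p = 1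
--     for i in range(n):
--         seq.append((a + i * d) * p)
--         p *= r
--     return seq
-- ===== Notes on version B (the rewrite author's own statement) =====
-- stated objective: faster
-- what changed: Replaces the back-to-front recursion (recurse to n-1, append on return, recompute r**(n-1) from scratch each level) by a single flat forward loop maintaining a running power of r.
import Mathlib
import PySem

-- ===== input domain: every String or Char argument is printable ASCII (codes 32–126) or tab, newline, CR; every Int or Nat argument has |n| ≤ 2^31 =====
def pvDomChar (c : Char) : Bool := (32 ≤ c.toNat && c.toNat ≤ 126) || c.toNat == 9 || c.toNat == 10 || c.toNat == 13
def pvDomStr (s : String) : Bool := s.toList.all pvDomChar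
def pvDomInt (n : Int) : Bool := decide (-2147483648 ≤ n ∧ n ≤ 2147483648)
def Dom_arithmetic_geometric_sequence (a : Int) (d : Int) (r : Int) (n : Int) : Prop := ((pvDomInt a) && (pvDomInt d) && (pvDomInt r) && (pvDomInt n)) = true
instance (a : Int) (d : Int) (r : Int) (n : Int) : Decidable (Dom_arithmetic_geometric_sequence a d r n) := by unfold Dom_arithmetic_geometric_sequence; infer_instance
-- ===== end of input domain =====

-- B replaces A's back-to-front recursion by one flat forward loop with a running power of r (objective: simpler).

-- ===== PORT A =====
-- A recurses on n; for n ≤ 0 the Python never reaches its base case (RecursionError),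
-- so the port recurses on n.toNat (0 there is unreachable under Pre_).
def pvAgsA (a d r : Int) : Nat → List Int
  | 0 => []                       -- A raises here (n ≤ 0); excluded by Pre_
  | 1 => [a]
  | (k+2) =>
      let sequence := pvAgsA a d r (k+1)
      let next_term := (a + ((k:Int)+1) * d) * r ^ (k+1)
      sequence ++ [next_term]

def arithmetic_geometric_sequence (a : Int) (d : Int) (r : Int) (n : Int) : List Int :=
  pvAgsA a d r n.toNat

-- ===== PORT B =====
def arithmetic_geometric_sequence_alt (a : Int) (d : Int) (r : Int) (n : Int) : List Int :=
  (PySem.List.pyRange 0 n 1).foldl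
    (fun (st : List Int × Int) i => (st.1 ++ [(a + i * d) * st.2], st.2 * r))
    ([], 1) |>.1

-- ===== PRECONDITION & SPEC =====
-- Pre_ excludes n ≤ 0, on which Python A raises RecursionError (no value returned).
def Pre_arithmetic_geometric_sequence (a : Int) (d : Int) (r : Int) (n : Int) : Prop := 1 ≤ n
instance (a : Int) (d : Int) (r : Int) (n : Int) : Decidable (Pre_arithmetic_geometric_sequence a d r n) := by unfold Pre_arithmetic_geometric_sequence; infer_instance
def pvWitness_arithmetic_geometric_sequence : Int × Int × Int × Int := (2, 3, 2, 4)

def Spec_arithmetic_geometric_sequence (a : Int) (d : Int) (r : Int) (n : Int) (out : List Int) : Prop := out = arithmetic_geometric_sequence_alt a d r n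
instance (a : Int) (d : Int) (r : Int) (n : Int) (out : List Int) : Decidable (Spec_arithmetic_geometric_sequence a d r n out) := by unfold Spec_arithmetic_geometric_sequence; infer_instance

-- ===== CLAIM (what is proved, stated in full; the proofs are below) =====
def Claim_equal_arithmetic_geometric_sequence : Prop := ∀ (a : Int) (d : Int) (r : Int) (n : Int), Dom_arithmetic_geometric_sequence a d r n → Pre_arithmetic_geometric_sequence a d r n → Spec_arithmetic_geometric_sequence a d r n (arithmetic_geometric_sequence a d r n)

-- ===== LEMMAS AND PROOFS =====
-- The loop of B, folded over range(0, m), produces exactly A's list and the power r^m.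
theorem pvLoop_eq (a d r : Int) (m : Nat) :
    (PySem.List.pyRange 0 m 1).foldl
      (fun (st : List Int × Int) i => (st.1 ++ [(a + i * d) * st.2], st.2 * r))
      ([], 1) = (pvAgsA a d r m, r ^ m) := by
  induction m with
  | zero => simp [PySem.List.pyRange_one_eq_nil, pvAgsA]
  | succ k ih =>
      have h : PySem.List.pyRange 0 ((k:Int)+1) 1
          = PySem.List.pyRange 0 (k:Int) 1 ++ [(k:Int)] :=
        PySem.List.pyRange_one_succ_right (by exact_mod_cast Nat.zero_le k)
      have hc : ((k+1 : Nat) : Int) = ((k:Int)+1) := by push_cast; ring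
      rw [hc, h, List.foldl_append, ih]
      cases k with
      | zero => simp [pvAgsA]
      | succ j =>
          simp only [pvAgsA, List.foldl_cons, List.foldl_nil, Prod.mk.injEq]
          refine ⟨?_, ?_⟩
          · push_cast; ring_nf
          · ring

-- ===== VERDICT (by name: the statement is the Claim_ definition above) =====
theorem arithmetic_geometric_sequence_spec : Claim_equal_arithmetic_geometric_sequence := by
  intro a d r n _ hn
  unfold Pre_arithmetic_geometric_sequence at hn
  unfold Spec_arithmetic_geometric_sequence arithmetic_geometric_sequence arithmetic_geometric_sequence_alt
  have hn' : ((n.toNat : Int)) = n := Int.toNat_of_nonneg (by omega)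
  rw [← hn', pvLoop_eq]
  simp
  congr 1
  omega
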